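-- pv_equiv track=rewrite | github.com/Kaushik-Ramanathan/Competitive-Coding-Answers-DSC | to return the string sorted in ascending order of the length of words.py | ArrangeWordsInAscendingOrderByLength
-- ===== SOURCE A (Python) =====
-- def ArrangeWordsInAscendingOrderByLength(string):
--     SortedList=string.split()
--     SortedStringInAscOrder= " "
--     SortedListByLength=sorted(SortedList, key=len)
--     for Word in SortedListByLength:
--         SortedStringInAscOrder+=  Word + '  '
--
--     SortedStringInAscOrder= SortedStringInAscOrder.strip()
--     return SortedStringInAscOrder
-- ===== SOURCE B (Python) =====
-- def ArrangeWordsInAscendingOrderByLength(string):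
--     words = string.split()
--     maxlen = max((len(w) for w in words), default=0)
--     buckets = [[] for _ in range(maxlen + 1)]
--     for w in words:
--         buckets[len(w)].append(w)
--     return '  '.join(w for b in buckets for w in b)
-- ===== Notes on version B (the rewrite author's own statement) =====
-- stated objective: alternative
-- what changed: Replaces the comparison sort (sorted with key=len) plus string accumulation with a strip by a counting/bucket sort over word lengths joined directly with the two-space separator.
import Mathlib
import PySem

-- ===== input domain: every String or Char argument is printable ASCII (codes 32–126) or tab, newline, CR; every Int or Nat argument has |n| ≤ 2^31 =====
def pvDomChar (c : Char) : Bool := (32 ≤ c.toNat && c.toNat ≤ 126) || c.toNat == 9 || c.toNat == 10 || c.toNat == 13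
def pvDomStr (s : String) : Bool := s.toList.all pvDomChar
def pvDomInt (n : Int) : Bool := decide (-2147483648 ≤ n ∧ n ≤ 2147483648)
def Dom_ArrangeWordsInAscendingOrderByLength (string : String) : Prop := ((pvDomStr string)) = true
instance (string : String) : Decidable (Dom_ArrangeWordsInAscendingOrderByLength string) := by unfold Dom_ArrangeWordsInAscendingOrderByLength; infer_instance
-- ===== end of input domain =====

-- B replaces A's comparison sort (sorted with key=len) + string accumulation + strip
-- by a counting/bucket sort over word lengths joined directly with the two-space separator.

-- ===== PORT A =====
-- literal port of A, working on List Char (PySem's string representation)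
def ArrangeWordsInAscendingOrderByLength (string : String) : String :=
  let SortedList := PySem.Chars.split₀ string.toList
  let SortedStringInAscOrder : List Char := [' ']
  let SortedListByLength := PySem.List.sorted SortedList (fun w => w.length) false
  let out := SortedListByLength.foldl (fun acc Word => acc ++ (Word ++ [' ', ' '])) SortedStringInAscOrder
  String.ofList (PySem.Chars.strip out)

-- ===== PORT B =====
-- literal port of Source B: buckets indexed by word length, then join with "  "
def ArrangeWordsInAscendingOrderByLength_alt (string : String) : String :=
  let words := PySem.Chars.split₀ string.toList
  let maxlen := PySem.List.maxD (words.map List.length) (fun x => x) 0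
  let buckets0 : List (List (List Char)) := (List.range (maxlen + 1)).map (fun _ => [])
  let buckets := words.foldl (fun bs w => bs.set w.length (bs.getD w.length [] ++ [w])) buckets0
  String.ofList (PySem.Chars.join [' ', ' '] buckets.flatten)

-- ===== PRECONDITION & SPEC =====
def Spec_ArrangeWordsInAscendingOrderByLength (string : String) (out : String) : Prop := out = ArrangeWordsInAscendingOrderByLength_alt string
instance (string : String) (out : String) : Decidable (Spec_ArrangeWordsInAscendingOrderByLength string out) := by unfold Spec_ArrangeWordsInAscendingOrderByLength; infer_instance

-- ===== CLAIM (what is proved, stated in full; the proofs are below) =====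
def Claim_equal_ArrangeWordsInAscendingOrderByLength : Prop := ∀ (string : String), Dom_ArrangeWordsInAscendingOrderByLength string → Spec_ArrangeWordsInAscendingOrderByLength string (ArrangeWordsInAscendingOrderByLength string)

-- ===== LEMMAS AND PROOFS =====

-- every word produced by str.split() is nonempty and contains no whitespace
theorem split₀_go_words (rest : List Char) : ∀ (cur : List Char) (acc : List (List Char)),
    (∀ c ∈ cur, PySem.Chars.isspace c = false) →
    (∀ p ∈ acc, p ≠ [] ∧ ∀ c ∈ p, PySem.Chars.isspace c = false) →
    ∀ w ∈ PySem.Chars.split₀.go rest cur acc, w ≠ [] ∧ ∀ c ∈ w, PySem.Chars.isspace c = false := by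
  induction rest with
  | nil =>
    intro cur acc hcur hacc w hw
    simp only [PySem.Chars.split₀.go] at hw
    by_cases hc : cur.isEmpty
    · simp only [hc, if_true] at hw
      exact hacc w (List.mem_reverse.mp hw)
    · simp only [hc] at hw
      rcases List.mem_cons.mp (List.mem_reverse.mp hw) with h | h
      · subst h
        have hcne : cur ≠ [] := by simpa [List.isEmpty_iff] using hc
        refine ⟨by simpa using hcne, ?_⟩
        intro c hcmem
        exact hcur c (List.mem_reverse.mp hcmem)
      · exact hacc w h
  | cons c rest ih =>
    intro cur acc hcur hacc w hw
    simp only [PySem.Chars.split₀.go] at hw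
    by_cases hs : PySem.Chars.isspace c
    · simp only [hs, if_true] at hw
      by_cases hc : cur.isEmpty
      · simp only [hc, if_true] at hw
        exact ih [] acc (by simp) hacc w hw
      · simp only [hc] at hw
        refine ih [] (cur.reverse :: acc) (by simp) ?_ w hw
        intro p hp
        rcases List.mem_cons.mp hp with h | h
        · subst h
          have hcne : cur ≠ [] := by simpa [List.isEmpty_iff] using hc
          exact ⟨by simpa using hcne, fun d hd => hcur d (List.mem_reverse.mp hd)⟩
        · exact hacc p h
    · simp only [hs] at hw
      refine ih (c :: cur) acc ?_ hacc w hw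
      intro d hd
      rcases List.mem_cons.mp hd with h | h
      · subst h; simpa using hs
      · exact hcur d h

theorem split₀_words (s : List Char) :
    ∀ w ∈ PySem.Chars.split₀ s, w ≠ [] ∧ ∀ c ∈ w, PySem.Chars.isspace c = false := by
  exact split₀_go_words s [] [] (by simp) (by simp)

-- insertBy passes over a prefix it never goes before
theorem insertBy_append_not {α : Type} (before : α → α → Bool) (x : α) (A B : List α)
    (h : ∀ a ∈ A, before x a = false) :
    PySem.List.insertBy before x (A ++ B) = A ++ PySem.List.insertBy before x B := by
  induction A with
  | nil => simp
  | cons a A ih =>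
    have ha := h a (List.mem_cons_self ..)
    simp only [List.cons_append, PySem.List.insertBy, ha, Bool.false_eq_true, if_false]
    rw [ih (fun b hb => h b (List.mem_cons_of_mem _ hb))]

theorem insertBy_all_before {α : Type} (before : α → α → Bool) (x : α) (B : List α)
    (h : ∀ b ∈ B, before x b = true) :
    PySem.List.insertBy before x B = x :: B := by
  cases B with
  | nil => rfl
  | cons b B => simp [PySem.List.insertBy, h b (List.mem_cons_self ..)]

-- the stable sort by length IS the concatenation of the length buckets
theorem sorted_eq_buckets (ws : List (List Char)) (n : Nat)
    (h : ∀ w ∈ ws, w.length < n) :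
    PySem.List.sorted ws (fun w => w.length) false
      = (List.range n).flatMap (fun k => ws.filter (fun w => w.length == k)) := by
  induction ws using List.reverseRecOn with
  | nil => simp [PySem.List.sorted]
  | append_singleton ws x ih =>
    have hx : x.length < n := h x (by simp)
    have hws : ∀ w ∈ ws, w.length < n := fun w hw => h w (by simp [hw])
    rw [PySem.List.sorted_eq_foldl_insertBy, List.foldl_append, List.foldl_cons, List.foldl_nil,
      ← PySem.List.sorted_eq_foldl_insertBy, ih hws]
    have hsplit : List.range n
        = (List.range x.length ++ [x.length]) ++ (List.range (n - (x.length + 1))).map (fun i => x.length + 1 + i) := by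
      conv_lhs => rw [show n = (x.length + 1) + (n - (x.length + 1)) by omega]
      rw [List.range_add, List.range_succ]
    rw [hsplit, List.flatMap_append, List.flatMap_append, List.flatMap_append, List.flatMap_append]
    have hf : ∀ k : Nat, (ws ++ [x]).filter (fun w => w.length == k)
        = ws.filter (fun w => w.length == k) ++ (if x.length = k then [x] else []) := by
      intro k
      rw [List.filter_append]
      by_cases hk : x.length = k <;> simp [hk]
    have hFA : (List.range x.length).flatMap (fun k => (ws ++ [x]).filter (fun w => w.length == k))
        = (List.range x.length).flatMap (fun k => ws.filter (fun w => w.length == k)) := by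
      refine List.flatMap_congr (fun k hk => ?_)
      have := List.mem_range.mp hk
      rw [hf]
      simp [show ¬ x.length = k by omega]
    have hFB : ((List.range (n - (x.length + 1))).map (fun i => x.length + 1 + i)).flatMap
          (fun k => (ws ++ [x]).filter (fun w => w.length == k))
        = ((List.range (n - (x.length + 1))).map (fun i => x.length + 1 + i)).flatMap
          (fun k => ws.filter (fun w => w.length == k)) := by
      refine List.flatMap_congr (fun k hk => ?_)
      obtain ⟨i, _, hik⟩ := List.mem_map.mp hk
      rw [hf]
      simp [show ¬ x.length = k by omega]
    have hfL : ([x.length] : List Nat).flatMap (fun k => (ws ++ [x]).filter (fun w => w.length == k))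
        = ([x.length] : List Nat).flatMap (fun k => ws.filter (fun w => w.length == k)) ++ [x] := by
      simp only [List.flatMap_cons, List.flatMap_nil, List.append_nil]
      rw [hf]
      simp
    rw [hFA, hFB, hfL]
    have hmemA : ∀ a ∈ (List.range x.length).flatMap (fun k => ws.filter (fun w => w.length == k))
        ++ ([x.length] : List Nat).flatMap (fun k => ws.filter (fun w => w.length == k)),
        (decide (x.length < a.length)) = false := by
      intro a ha
      rcases List.mem_append.mp ha with h' | h'
      · obtain ⟨k, hk, haf⟩ := List.mem_flatMap.mp h'
        have hk' := List.mem_range.mp hk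
        have := of_decide_eq_true (List.mem_filter.mp haf).2
        simp at this
        simp [decide_eq_false_iff_not]
        omega
      · obtain ⟨k, hk, haf⟩ := List.mem_flatMap.mp h'
        simp only [List.mem_singleton] at hk
        have := of_decide_eq_true (List.mem_filter.mp haf).2
        simp at this
        simp [decide_eq_false_iff_not]
        omega
    have hmemB : ∀ b ∈ ((List.range (n - (x.length + 1))).map (fun i => x.length + 1 + i)).flatMap
          (fun k => ws.filter (fun w => w.length == k)),
        (decide (x.length < b.length)) = true := by
      intro b hb
      obtain ⟨k, hk, hbf⟩ := List.mem_flatMap.mp hb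
      obtain ⟨i, _, hik⟩ := List.mem_map.mp hk
      have := of_decide_eq_true (List.mem_filter.mp hbf).2
      simp at this
      simp only [decide_eq_true_eq]
      omega
    rw [insertBy_append_not _ _ _ _ hmemA, insertBy_all_before _ _ _ hmemB]
    simp [List.append_assoc]

-- the bucket-filling loop computes the filters
theorem bucket_foldl (ws : List (List Char)) : ∀ (bs : List (List (List Char))),
    (∀ w ∈ ws, w.length < bs.length) →
    ws.foldl (fun bs w => bs.set w.length (bs.getD w.length [] ++ [w])) bs
      = (List.range bs.length).map (fun k => bs.getD k [] ++ ws.filter (fun w => w.length == k)) := by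
  induction ws with
  | nil =>
    intro bs h
    simp only [List.foldl_nil, List.filter_nil, List.append_nil]
    apply List.ext_getElem
    · simp
    · intro i h1 h2
      simp [List.getD_eq_getElem?_getD, List.getElem?_eq_getElem h1]
  | cons w ws ih =>
    intro bs h
    have hlw : w.length < bs.length := h w (List.mem_cons_self ..)
    simp only [List.foldl_cons]
    rw [ih _ (by intro v hv; simpa using h v (List.mem_cons_of_mem _ hv))]
    simp only [List.length_set]
    refine List.map_congr_left (fun k hk => ?_)
    have hk' := List.mem_range.mp hk
    by_cases hkw : w.length = k
    · subst hkw
      rw [List.getD_eq_getElem?_getD, List.getElem?_set_self' , List.getElem?_eq_getElem hlw]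
      simp [List.getD_eq_getElem?_getD, List.getElem?_eq_getElem hlw]
    · rw [List.getD_eq_getElem?_getD, List.getElem?_set_ne (by omega)]
      simp [hkw, List.getD_eq_getElem?_getD]

-- flatten of word++sep blocks, nonempty case
theorem flat_blocks (L : List (List Char)) (hL : L ≠ []) :
    L.flatMap (fun w => w ++ [' ', ' ']) = PySem.Chars.join [' ', ' '] L ++ [' ', ' '] := by
  induction L with
  | nil => exact absurd rfl hL
  | cons w L ih =>
    cases L with
    | nil => simp [PySem.Chars.join_singleton]
    | cons v L' =>
      rw [List.flatMap_cons, ih (by simp), PySem.Chars.join_cons_cons]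
      simp [List.append_assoc]

theorem join_rev_head (L : List (List Char)) (hL : L ≠ [])
    (hw : ∀ w ∈ L, w ≠ [] ∧ ∀ c ∈ w, PySem.Chars.isspace c = false) :
    ∃ c t, (PySem.Chars.join [' ', ' '] L).reverse = c :: t ∧ PySem.Chars.isspace c = false := by
  induction L with
  | nil => exact absurd rfl hL
  | cons w L ih =>
    cases L with
    | nil =>
      obtain ⟨hne, hch⟩ := hw w (by simp)
      have hrev : w.reverse ≠ [] := by simpa using hne
      obtain ⟨c, t, hct⟩ := List.exists_cons_of_ne_nil hrev
      refine ⟨c, t, by simpa [PySem.Chars.join_singleton] using hct, ?_⟩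
      have : c ∈ w.reverse := by rw [hct]; exact List.mem_cons_self ..
      exact hch c (List.mem_reverse.mp this)
    | cons v L' =>
      obtain ⟨c, t, hct, hc⟩ := ih (by simp) (fun u hu => hw u (List.mem_cons_of_mem _ hu))
      refine ⟨c, t ++ ([' ', ' '].reverse ++ w.reverse), ?_, hc⟩
      rw [PySem.Chars.join_cons_cons]
      simp [List.reverse_append, hct, List.append_assoc]

-- A's accumulate-then-strip equals join with the two-space separator
theorem strip_eq_join (L : List (List Char))
    (hw : ∀ w ∈ L, w ≠ [] ∧ ∀ c ∈ w, PySem.Chars.isspace c = false) :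
    PySem.Chars.strip ([' '] ++ L.flatMap (fun w => w ++ [' ', ' ']))
      = PySem.Chars.join [' ', ' '] L := by
  cases L with
  | nil =>
    simp [PySem.Chars.strip, PySem.Chars.lstrip, PySem.Chars.rstrip, PySem.Chars.join_nil,
      List.dropWhile, PySem.Chars.isspace]
  | cons w L' =>
    obtain ⟨hne, hch⟩ := hw w (by simp)
    obtain ⟨c0, w', hw0⟩ := List.exists_cons_of_ne_nil hne
    have hc0 : PySem.Chars.isspace c0 = false := hch c0 (by simp [hw0])
    rw [flat_blocks (w :: L') (by simp)]
    obtain ⟨c, t, hct, hc⟩ := join_rev_head (w :: L') (by simp) hw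
    have hJhead : ∃ Y, PySem.Chars.join [' ', ' '] (w :: L') = c0 :: Y := by
      cases L' with
      | nil => exact ⟨w', by simp [PySem.Chars.join_singleton, hw0]⟩
      | cons v L'' =>
        refine ⟨w' ++ ([' ', ' '] ++ PySem.Chars.join [' ', ' '] (v :: L'')), ?_⟩
        rw [PySem.Chars.join_cons_cons, hw0]
        simp [List.append_assoc]
    obtain ⟨Y, hXY⟩ := hJhead
    simp only [PySem.Chars.strip, PySem.Chars.lstrip, PySem.Chars.rstrip]
    rw [List.singleton_append, List.dropWhile_cons]
    simp only [show PySem.Chars.isspace ' ' = true from by decide, if_true]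
    rw [hXY, List.cons_append, List.dropWhile_cons, hc0]
    simp only [Bool.false_eq_true, if_false]
    rw [← List.cons_append, ← hXY, List.reverse_append, hct]
    simp only [List.reverse_cons, List.reverse_nil, List.nil_append, List.cons_append,
      List.dropWhile_cons, show PySem.Chars.isspace ' ' = true from by decide, if_true,
      List.nil_append, hc, Bool.false_eq_true, if_false]
    have hj := congrArg List.reverse hct
    simp only [List.reverse_reverse, List.reverse_cons] at hj
    exact hj.symm

-- ===== VERDICT (by name: the statement is the Claim_ definition above) =====
theorem ArrangeWordsInAscendingOrderByLength_spec : Claim_equal_ArrangeWordsInAscendingOrderByLength := by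
  intro s _
  unfold Spec_ArrangeWordsInAscendingOrderByLength ArrangeWordsInAscendingOrderByLength
    ArrangeWordsInAscendingOrderByLength_alt
  simp only []
  set ws := PySem.Chars.split₀ s.toList with hws
  set m := PySem.List.maxD (ws.map List.length) (fun x => x) 0 with hm
  have hbound : ∀ w ∈ ws, w.length < m + 1 := by
    intro w hw
    have hnn : ws.map List.length ≠ [] := by
      simpa using List.ne_nil_of_mem hw
    have h2 : w.length ≤ m :=
      PySem.List.le_key_maxD (ws.map List.length) (fun x => x) 0 hnn
        w.length (List.mem_map_of_mem hw)
    omega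
  have hlen : ((List.range (m + 1)).map (fun _ => ([] : List (List Char)))).length = m + 1 := by
    simp
  have hgd : ∀ k : Nat, ((List.range (m + 1)).map (fun _ => ([] : List (List Char)))).getD k [] = [] := by
    intro k
    rw [List.getD_eq_getElem?_getD, List.getElem?_map]
    cases h : (List.range (m + 1))[k]? <;> simp
  rw [bucket_foldl ws _ (by rw [hlen]; exact hbound), hlen]
  simp only [hgd, List.nil_append]
  have hflat : ((List.range (m + 1)).map (fun k => ws.filter (fun w => w.length == k))).flatten
      = (List.range (m + 1)).flatMap (fun k => ws.filter (fun w => w.length == k)) := by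
    rw [List.flatMap_def]
  rw [hflat, ← sorted_eq_buckets ws (m + 1) hbound]
  rw [PySem.List.foldl_append_eq_flatMap]
  have hwprops : ∀ w ∈ PySem.List.sorted ws (fun w => w.length) false,
      w ≠ [] ∧ ∀ c ∈ w, PySem.Chars.isspace c = false := by
    intro w hw
    have : w ∈ ws := (PySem.List.mem_sorted ..).mp hw
    exact split₀_words s.toList w this
  rw [strip_eq_join _ hwprops]
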